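-- pv_equiv track=rewrite | github.com/desihub/desispec | py/desispec/pipeline/plan.py | task_dist
-- ===== SOURCE A (Python) =====
-- def task_dist(tasklist, nworker):
--     ntask = len(tasklist)
--     work = {}
--     for i in range(nworker):
--         myn = ntask // nworker
--         off = 0
--         leftover = ntask % nworker
--         if ( i < leftover ):
--             myn = myn + 1
--             off = i * myn
--         else:
--             off = ((myn + 1) * leftover) + (myn * (i - leftover))
--         work[i] = tasklist[off:(off+myn)]
--     return work
-- ===== SOURCE B (Python) =====
-- def task_dist(tasklist, nworker):
--     if nworker <= 0:
--         return {}
--     base = len(tasklist) // nworker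
--     leftover = len(tasklist) % nworker
--     work = {}
--     off = 0
--     for i in range(nworker):
--         size = base + 1 if i < leftover else base
--         work[i] = tasklist[off:off + size]
--         off += size
--     return work
-- ===== Notes on version B (the rewrite author's own statement) =====
-- stated objective: simpler
-- what changed: B guards the no-worker case, hoists the base/leftover division out of the loop and threads a running offset accumulator through the workers, instead of A's per-iteration recomputed division and closed-form offset arithmetic.
import Mathlib
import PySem

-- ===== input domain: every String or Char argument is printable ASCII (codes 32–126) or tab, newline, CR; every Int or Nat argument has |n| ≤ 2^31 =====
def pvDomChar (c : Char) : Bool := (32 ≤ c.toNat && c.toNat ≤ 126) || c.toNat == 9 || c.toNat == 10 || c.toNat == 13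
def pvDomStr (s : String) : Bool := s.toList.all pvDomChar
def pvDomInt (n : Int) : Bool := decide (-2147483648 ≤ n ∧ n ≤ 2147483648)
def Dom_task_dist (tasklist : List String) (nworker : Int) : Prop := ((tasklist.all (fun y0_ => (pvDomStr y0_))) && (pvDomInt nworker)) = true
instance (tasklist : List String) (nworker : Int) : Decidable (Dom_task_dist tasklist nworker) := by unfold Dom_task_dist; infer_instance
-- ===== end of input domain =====

-- B hoists the division out of the loop and threads a running offset accumulator through the
-- workers, instead of A's per-iteration recomputed closed-form offset arithmetic. Objective: simpler.

-- ===== PORT A =====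
def task_dist (tasklist : List String) (nworker : Int) : List (Int × List String) :=
  let ntask : Int := PySem.List.len tasklist
  let work : PySem.Dict Int (List String) := PySem.Dict.empty
  let work := (PySem.List.pyRange 0 nworker 1).foldl (fun work i =>
    let myn := PySem.Int.floordiv ntask nworker
    let leftover := PySem.Int.mod ntask nworker
    if i < leftover then
      let myn := myn + 1
      let off := i * myn
      work.insert i (PySem.List.slice tasklist (some off) (some (off + myn)))
    else
      let off := ((myn + 1) * leftover) + (myn * (i - leftover))
      work.insert i (PySem.List.slice tasklist (some off) (some (off + myn)))) work
  work.items

-- ===== PORT B =====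
def task_dist_alt (tasklist : List String) (nworker : Int) : List (Int × List String) :=
  if nworker ≤ 0 then [] else
  let base := PySem.Int.floordiv (PySem.List.len tasklist) nworker
  let leftover := PySem.Int.mod (PySem.List.len tasklist) nworker
  let st := (PySem.List.pyRange 0 nworker 1).foldl
    (fun (st : PySem.Dict Int (List String) × Int) i =>
      let size := if i < leftover then base + 1 else base
      (st.1.insert i (PySem.List.slice tasklist (some st.2) (some (st.2 + size))),
       st.2 + size))
    ((PySem.Dict.empty : PySem.Dict Int (List String)), (0 : Int))
  st.1.items

-- ===== PRECONDITION & SPEC =====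
def Spec_task_dist (tasklist : List String) (nworker : Int) (out : List (Int × List String)) : Prop := out = task_dist_alt tasklist nworker
instance (tasklist : List String) (nworker : Int) (out : List (Int × List String)) : Decidable (Spec_task_dist tasklist nworker out) := by unfold Spec_task_dist; infer_instance

-- ===== CLAIM (what is proved, stated in full; the proofs are below) =====
def Claim_equal_task_dist : Prop := ∀ (tasklist : List String) (nworker : Int), Dom_task_dist tasklist nworker → Spec_task_dist tasklist nworker (task_dist tasklist nworker)

-- ===== LEMMAS AND PROOFS =====

-- loop invariant: after m iterations B's state is (A's dict, the tail of tasklist starting at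
-- A's closed-form offset q*m + min m r), where q/r are length divmod nworker
lemma task_dist_loop_inv (xs : List String) (n : Nat) (_hn : 0 < n) (m : Nat) (hm : m ≤ n)
    (d : PySem.Dict Int (List String)) :
    (PySem.List.pyRange 0 m 1).foldl
      (fun (st : PySem.Dict Int (List String) × Int) i =>
        let size := if i < PySem.Int.mod (PySem.List.len xs) (n : Int) then
            PySem.Int.floordiv (PySem.List.len xs) (n : Int) + 1
          else PySem.Int.floordiv (PySem.List.len xs) (n : Int)
        (st.1.insert i (PySem.List.slice xs (some st.2) (some (st.2 + size))),
         st.2 + size))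
      (d, (0 : Int))
    = ((PySem.List.pyRange 0 m 1).foldl (fun work i =>
        let myn := PySem.Int.floordiv (PySem.List.len xs) (n : Int)
        let leftover := PySem.Int.mod (PySem.List.len xs) (n : Int)
        if i < leftover then
          let myn := myn + 1
          let off := i * myn
          work.insert i (PySem.List.slice xs (some off) (some (off + myn)))
        else
          let off := ((myn + 1) * leftover) + (myn * (i - leftover))
          work.insert i (PySem.List.slice xs (some off) (some (off + myn)))) d,
       ((xs.length / n * m + min m (xs.length % n) : Nat) : Int)) := by
  induction m with
  | zero =>
    simp
  | succ m ih =>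
    have hm' : m ≤ n := Nat.le_of_succ_le hm
    have hcast : ((m + 1 : Nat) : Int) = (m : Int) + 1 := by push_cast; ring
    rw [hcast, PySem.List.pyRange_one_succ_right (by positivity),
        List.foldl_append, List.foldl_append, ih hm']
    simp only [List.foldl_cons, List.foldl_nil]
    have hlen : PySem.List.len xs = ((xs.length : Nat) : Int) := by simp
    have hq : PySem.Int.floordiv (PySem.List.len xs) (n : Int) = ((xs.length / n : Nat) : Int) := by
      rw [hlen]; exact PySem.Int.floordiv_natCast _ _
    have hr : PySem.Int.mod (PySem.List.len xs) (n : Int) = ((xs.length % n : Nat) : Int) := by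
      rw [hlen]; exact PySem.Int.mod_natCast _ _
    simp only [hq, hr]
    by_cases hc : m < xs.length % n
    · have hc' : ((m : Nat) : Int) < ((xs.length % n : Nat) : Int) := by exact_mod_cast hc
      simp only [if_pos hc']
      have e3 : (((xs.length / n : Nat) : Int) + 1) = ((xs.length / n + 1 : Nat) : Int) := by push_cast; ring
      have e4 : ((m : Nat) : Int) * ((xs.length / n + 1 : Nat) : Int)
          = ((m * (xs.length / n + 1) : Nat) : Int) := by push_cast; ring
      have h5 : xs.length / n * m + min m (xs.length % n) = m * (xs.length / n + 1) := by
        rw [Nat.min_eq_left (by omega)]; ring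
      rw [e3, e4, h5, PySem.List.slice_natCast_add,
          ← Nat.cast_add]
      have h6 : m * (xs.length / n + 1) + (xs.length / n + 1)
          = xs.length / n * (m + 1) + min (m + 1) (xs.length % n) := by
        rw [Nat.min_eq_left (by omega)]; ring
      rw [h6]
    · have hc' : ¬ ((m : Nat) : Int) < ((xs.length % n : Nat) : Int) := by exact_mod_cast hc
      simp only [if_neg hc']
      have e1 : (((xs.length / n : Nat) : Int) + 1) * ((xs.length % n : Nat) : Int)
            + ((xs.length / n : Nat) : Int) * (((m : Nat) : Int) - ((xs.length % n : Nat) : Int))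
          = (((xs.length / n + 1) * (xs.length % n) + xs.length / n * (m - xs.length % n) : Nat) : Int) := by
        push_cast [Nat.cast_sub (Nat.le_of_not_lt hc)]; ring
      have h5 : xs.length / n * m + min m (xs.length % n)
          = (xs.length / n + 1) * (xs.length % n) + xs.length / n * (m - xs.length % n) := by
        rw [Nat.min_eq_right (by omega)]
        obtain ⟨k, rfl⟩ : ∃ k, m = xs.length % n + k := ⟨m - xs.length % n, by omega⟩
        rw [Nat.add_sub_cancel_left]; ring
      rw [e1, h5, PySem.List.slice_natCast_add,
          ← Nat.cast_add]
      have h6 : (xs.length / n + 1) * (xs.length % n) + xs.length / n * (m - xs.length % n) + xs.length / n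
          = xs.length / n * (m + 1) + min (m + 1) (xs.length % n) := by
        rw [Nat.min_eq_right (by omega)]
        obtain ⟨k, rfl⟩ : ∃ k, m = xs.length % n + k := ⟨m - xs.length % n, by omega⟩
        rw [Nat.add_sub_cancel_left]; ring
      rw [h6]


-- ===== VERDICT (by name: the statement is the Claim_ definition above) =====
theorem task_dist_spec : Claim_equal_task_dist := by
  intro tasklist nworker _
  unfold Spec_task_dist
  by_cases h : nworker ≤ 0
  · simp [task_dist, task_dist_alt, h, PySem.List.pyRange_one_eq_nil h]
    rfl
  · obtain ⟨n, hn⟩ : ∃ n : Nat, nworker = (n : Int) := ⟨nworker.toNat, by omega⟩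
    subst hn
    have hn0 : 0 < n := by exact_mod_cast not_le.mp h
    have key := task_dist_loop_inv tasklist n hn0 n le_rfl PySem.Dict.empty
    simp only [task_dist, task_dist_alt, if_neg h]
    rw [key]
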